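-- pv_equiv track=rewrite | github.com/ni-lie/CS199-TreePoset | Utils/TreePoset_Utils_v2.py | binaryToCover
-- ===== SOURCE A (Python) =====
-- def binaryToCover(P):
--     #find number of vertices n
--     n = 1
--     for pair in P:
--         if max(pair) > n:
--             n = max(pair)
--
--     coverRelations = []
--     for (u,v) in P:
--         if (u,v) in coverRelations:
--             continue
--         #if len(coverRelations) == n - 1:
--         #    break
--         transitive = False
--         for w in range(1, n+1):
--             if w == u or w == v:
--                 continue
--             else:
--                 if (u,w) in P and (w,v) in P:
--                     transitive = True
--                     break
--         if not transitive:
--             coverRelations.append((u,v))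
--     return sorted(coverRelations)
-- ===== SOURCE B (Python) =====
-- def binaryToCover(P):
--     Pset = set(P)
--     succ = {}
--     for (u, v) in P:
--         succ.setdefault(u, []).append(v)
--     covers = [(u, v) for (u, v) in Pset
--               if not any(w != u and w != v and (w, v) in Pset for w in succ[u])]
--     return sorted(covers)
-- ===== Notes on version B (the rewrite author's own statement) =====
-- stated objective: alternative
-- what changed: Instead of computing the max vertex n and scanning every vertex w in 1..n with list-membership tests per edge, B builds a set of P and an adjacency-list index once and tests transitivity by walking only u's actual out-neighbours with hash-set lookups, collecting covers with a comprehension over the deduplicated edge set.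
-- intended difference: On inputs where some edge (u,v) is transitive only via a non-positive intermediate w<=0 (with (u,w) and (w,v) in P and no such intermediate w>=1), A still lists (u,v) as a cover because its witness scan range(1,n+1) ignores non-positive labels, while B drops the transitive edge, which is the intended set of cover relations. — e.g. on binaryToCover([(1,2),(1,0),(0,2)]): A returns [(0,2),(1,0),(1,2)], B returns [(0,2),(1,0)]
import Mathlib
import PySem

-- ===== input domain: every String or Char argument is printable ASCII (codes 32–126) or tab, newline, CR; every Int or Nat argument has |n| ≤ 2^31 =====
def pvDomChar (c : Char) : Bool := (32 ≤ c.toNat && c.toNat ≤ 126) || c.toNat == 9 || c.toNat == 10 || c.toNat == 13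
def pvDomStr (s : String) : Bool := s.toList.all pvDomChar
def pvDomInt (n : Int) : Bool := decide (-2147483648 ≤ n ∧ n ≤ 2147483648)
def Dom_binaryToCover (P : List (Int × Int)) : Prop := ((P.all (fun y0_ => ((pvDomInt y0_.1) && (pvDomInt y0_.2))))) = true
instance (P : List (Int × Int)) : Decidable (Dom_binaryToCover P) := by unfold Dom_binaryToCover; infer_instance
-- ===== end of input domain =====

-- B replaces A's scan over all vertices 1..n by set-membership and a precomputed adjacency index (objective: alternative).

-- ===== PORT A =====
def binaryToCover (P : List (Int × Int)) : List (Int × Int) :=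
  -- n = 1; for pair in P: if max(pair) > n: n = max(pair)
  let n : Int := P.foldl (fun n pair =>
    if max pair.1 pair.2 > n then max pair.1 pair.2 else n) 1
  -- coverRelations loop
  let cover := P.foldl (fun acc uv =>
    if acc.contains uv then acc
    else
      -- for w in range(1, n+1): skip w==u, w==v; transitive=True & break on (u,w) in P and (w,v) in P
      if (PySem.List.pyRange 1 (n+1) 1).any (fun w =>
        if w == uv.1 || w == uv.2 then false
        else P.contains (uv.1, w) && P.contains (w, uv.2)) then acc
      else acc ++ [uv]) []
  PySem.List.sorted2 cover (·.1) (·.2)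

-- ===== PORT B =====
def binaryToCover_alt (P : List (Int × Int)) : List (Int × Int) :=
  let pset : PySem.Set (Int × Int) := PySem.Set.ofList P
  -- succ.setdefault(u, []).append(v)
  let succ := P.foldl (fun d p => d.modify p.1 [] (fun s => s ++ [p.2])) PySem.Dict.empty
  -- [(u, v) for (u, v) in Pset if not any(w != u and w != v and (w, v) in Pset for w in succ[u])]
  let covers := pset.filter (fun uv =>
    !((succ.getD uv.1 []).any (fun w =>
      w != uv.1 && w != uv.2 && PySem.Set.contains pset (w, uv.2))))
  PySem.List.sorted2 covers (·.1) (·.2)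

-- ===== PRECONDITION & SPEC =====
-- When some edge (u,v) of P is transitive only via a non-positive intermediate (some w ≤ 0, w≠u, w≠v with
-- (u,w),(w,v) in P, and no such intermediate w ≥ 1 exists), A still reports (u,v) as a cover relation because
-- its witness scan range(1,n+1) ignores non-positive vertex labels; B drops the transitive edge, which is the
-- intended set of cover relations of the order.
-- q's endpoint is an intermediate vertex making edge p transitive
def pvTrans (P : List (Int × Int)) (p q : Int × Int) : Prop :=
  q.1 = p.1 ∧ q.2 ≠ p.1 ∧ q.2 ≠ p.2 ∧ (q.2, p.2) ∈ P
def D_binaryToCover (P : List (Int × Int)) : Prop :=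
  ∃ p ∈ P, (∃ q ∈ P, pvTrans P p q) ∧ ∀ q ∈ P, pvTrans P p q → q.2 ≤ 0
instance (P : List (Int × Int)) : Decidable (D_binaryToCover P) := by unfold D_binaryToCover pvTrans; infer_instance

def Spec_binaryToCover (P : List (Int × Int)) (out : List (Int × Int)) : Prop :=
  ¬ D_binaryToCover P → out = binaryToCover_alt P
instance (P : List (Int × Int)) (out : List (Int × Int)) : Decidable (Spec_binaryToCover P out) := by unfold Spec_binaryToCover; infer_instance

def pvDiffWitness_binaryToCover : (List (Int × Int)) := [(1,2),(1,0),(0,2)]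
def pvDiffWitnessOut_binaryToCover : (List (Int × Int)) × (List (Int × Int)) :=
  ([(0,2),(1,0),(1,2)], [(0,2),(1,0)])

-- ===== CLAIM (what is proved, stated in full; the proofs are below) =====
def Claim_unchanged_binaryToCover : Prop := ∀ (P : List (Int × Int)), Dom_binaryToCover P → Spec_binaryToCover P (binaryToCover P)
def Claim_changed_binaryToCover : Prop := Dom_binaryToCover (pvDiffWitness_binaryToCover) ∧ D_binaryToCover (pvDiffWitness_binaryToCover) ∧ binaryToCover (pvDiffWitness_binaryToCover) = pvDiffWitnessOut_binaryToCover.1 ∧ binaryToCover_alt (pvDiffWitness_binaryToCover) = pvDiffWitnessOut_binaryToCover.2 ∧ pvDiffWitnessOut_binaryToCover.1 ≠ pvDiffWitnessOut_binaryToCover.2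
def Claim_exact_binaryToCover : Prop := ∀ (P : List (Int × Int)), Dom_binaryToCover P → D_binaryToCover P → binaryToCover P ≠ binaryToCover_alt P

-- ===== LEMMAS AND PROOFS =====

-- A's transitivity test for an edge uv (scan of all vertices 1..n)
def tA (P : List (Int × Int)) (uv : Int × Int) : Bool :=
  (PySem.List.pyRange 1
      ((P.foldl (fun n pair => if max pair.1 pair.2 > n then max pair.1 pair.2 else n) 1) + 1) 1).any
    (fun w => if w == uv.1 || w == uv.2 then false
      else P.contains (uv.1, w) && P.contains (w, uv.2))

-- B's transitivity test for an edge uv (walk over u's out-neighbours)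
def tB (P : List (Int × Int)) (uv : Int × Int) : Bool :=
  ((P.foldl (fun d p => d.modify p.1 [] (fun s => s ++ [p.2]))
      (PySem.Dict.empty : PySem.Dict Int (List Int))).getD uv.1 []).any
    (fun w => w != uv.1 && w != uv.2 && PySem.Set.contains (PySem.Set.ofList P) (w, uv.2))

-- the n-fold dominates every second component of P (and is ≥ its init)
theorem nfold_ge (P : List (Int × Int)) (c : Int) :
    c ≤ P.foldl (fun n pair => if max pair.1 pair.2 > n then max pair.1 pair.2 else n) c ∧
    ∀ p ∈ P, p.2 ≤ P.foldl (fun n pair => if max pair.1 pair.2 > n then max pair.1 pair.2 else n) c := by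
  induction P generalizing c with
  | nil => simp
  | cons q t ih =>
    simp only [List.foldl_cons, List.mem_cons]
    constructor
    · refine le_trans ?_ (ih _).1
      split <;> omega
    · rintro p (rfl | hp)
      · refine le_trans ?_ (ih _).1
        split <;> omega
      · exact (ih _).2 p hp

-- membership in the adjacency lists built by the succ fold
theorem succ_mem (P : List (Int × Int)) (u w : Int) :
    w ∈ (P.foldl (fun d p => d.modify p.1 [] (fun s => s ++ [p.2]))
          (PySem.Dict.empty : PySem.Dict Int (List Int))).getD u [] ↔ (u, w) ∈ P := by
  rw [PySem.Dict.getD_foldl_modify_append]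
  simp only [PySem.Dict.getD, PySem.Dict.get?, PySem.Dict.empty,
    List.find?_nil, Option.map_none, Option.getD_none, List.nil_append, List.mem_map,
    List.mem_filter, beq_iff_eq]
  constructor
  · rintro ⟨⟨a, b⟩, ⟨hm, rfl⟩, rfl⟩; exact hm
  · intro h; exact ⟨(u, w), ⟨h, rfl⟩, rfl⟩

-- characterisation of A's transitivity test
theorem tA_iff (P : List (Int × Int)) (uv : Int × Int) :
    tA P uv = true ↔
      ∃ uw ∈ P, uw.1 = uv.1 ∧ 1 ≤ uw.2 ∧ uw.2 ≠ uv.1 ∧ uw.2 ≠ uv.2 ∧ (uw.2, uv.2) ∈ P := by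
  unfold tA
  simp only [List.any_eq_true, PySem.List.mem_pyRange_one, Bool.or_eq_true, beq_iff_eq]
  constructor
  · rintro ⟨w, ⟨h1, _⟩, hw⟩
    split_ifs at hw with h
    push Not at h
    simp only [Bool.and_eq_true, List.contains_eq_mem, decide_eq_true_eq] at hw
    exact ⟨(uv.1, w), hw.1, rfl, h1, h.1, h.2, hw.2⟩
  · rintro ⟨uw, hm, heq, h1, hu, hv, hwv⟩
    have huw : (uv.1, uw.2) ∈ P := by
      have : uw = (uv.1, uw.2) := by
        cases uw; simp_all
      rwa [← this]
    refine ⟨uw.2, ⟨h1, ?_⟩, ?_⟩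
    · have := (nfold_ge P 1).2 (uv.1, uw.2) huw
      omega
    · rw [if_neg (by simp [hu, hv])]
      simp only [Bool.and_eq_true, List.contains_eq_mem, decide_eq_true_eq]
      exact ⟨huw, hwv⟩

-- characterisation of B's transitivity test
theorem tB_iff (P : List (Int × Int)) (uv : Int × Int) :
    tB P uv = true ↔
      ∃ uw ∈ P, uw.1 = uv.1 ∧ uw.2 ≠ uv.1 ∧ uw.2 ≠ uv.2 ∧ (uw.2, uv.2) ∈ P := by
  unfold tB
  simp only [List.any_eq_true, succ_mem, Bool.and_eq_true, bne_iff_ne,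
    PySem.Set.contains_iff, PySem.Set.mem_ofList]
  constructor
  · rintro ⟨w, hw, ⟨hu, hv⟩, hwv⟩
    exact ⟨(uv.1, w), hw, rfl, hu, hv, hwv⟩
  · rintro ⟨uw, hm, heq, hu, hv, hwv⟩
    have huw : (uv.1, uw.2) ∈ P := by
      have : uw = (uv.1, uw.2) := by
        cases uw; simp_all
      rwa [← this]
    exact ⟨uw.2, huw, ⟨hu, hv⟩, hwv⟩

-- outside D_, the two transitivity tests agree on edges of P
theorem tA_eq_tB (P : List (Int × Int)) (hD : ¬ D_binaryToCover P)
    (uv : Int × Int) (huv : uv ∈ P) : tA P uv = tB P uv := by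
  rw [Bool.eq_iff_iff, tA_iff, tB_iff]
  constructor
  · rintro ⟨uw, hm, heq, _, hu, hv, hwv⟩
    exact ⟨uw, hm, heq, hu, hv, hwv⟩
  · rintro ⟨uw, hm, heq, hu, hv, hwv⟩
    by_cases hpos : ∃ uw' ∈ P, uw'.1 = uv.1 ∧ 1 ≤ uw'.2 ∧ uw'.2 ≠ uv.1 ∧ uw'.2 ≠ uv.2 ∧ (uw'.2, uv.2) ∈ P
    · exact hpos
    · exfalso
      apply hD
      unfold D_binaryToCover pvTrans
      refine ⟨uv, huv, ⟨uw, hm, heq, hu, hv, hwv⟩, ?_⟩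
      rintro q hq ⟨heq', hu', hv', hwv'⟩
      by_contra h1
      exact hpos ⟨q, hq, heq', by omega, hu', hv', hwv'⟩

-- an edge of the list with a false transitivity test ends up in A's accumulator
theorem mem_loopA (P : List (Int × Int)) (l : List (Int × Int)) (acc : List (Int × Int))
    (uv : Int × Int) (h : uv ∈ acc ∨ (uv ∈ l ∧ tA P uv = false)) :
    uv ∈ l.foldl (fun acc uv =>
        if acc.contains uv then acc
        else if tA P uv then acc else acc ++ [uv]) acc := by
  induction l generalizing acc with
  | nil => simpa using h.resolve_right (by simp)
  | cons x t ih =>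
    simp only [List.foldl_cons]
    rcases h with hacc | ⟨hmem, hfa⟩
    · refine ih _ (Or.inl ?_)
      split_ifs <;> simp [hacc]
    · rcases List.mem_cons.1 hmem with rfl | ht
      · refine ih _ (Or.inl ?_)
        by_cases hc : acc.contains uv = true
        · rw [if_pos hc]
          simpa [List.contains_eq_mem] using hc
        · rw [if_neg hc, if_neg (by simp [hfa])]
          simp
      · refine ih _ (Or.inr ⟨ht, hfa⟩)

-- A's accumulation loop equals a filter over the set built so far
theorem loop_eq (P : List (Int × Int)) (l : List (Int × Int))
    (h : ∀ uv ∈ l, tA P uv = tB P uv) (s : List (Int × Int)) :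
    l.foldl (fun acc uv =>
        if acc.contains uv then acc
        else if tA P uv then acc else acc ++ [uv])
      (s.filter (fun x => !tB P x))
    = (l.foldl (fun t x => PySem.Set.add t x) s).filter (fun x => !tB P x) := by
  induction l generalizing s with
  | nil => rfl
  | cons x t ih =>
    simp only [List.foldl_cons]
    have hx := h x (List.mem_cons_self ..)
    have ht : ∀ uv ∈ t, tA P uv = tB P uv := fun uv hm => h uv (List.mem_cons_of_mem _ hm)
    rw [hx]
    by_cases hs : x ∈ s
    · have hadd : PySem.Set.add s x = s := by
        simp [PySem.Set.add, List.contains_eq_mem, hs]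
      by_cases hb : tB P x = true
      · have : (s.filter (fun x => !tB P x)).contains x = false := by
          simp [List.contains_eq_mem, List.mem_filter, hb]
        rw [this, if_neg (by simp), if_pos hb, hadd]
        exact ih ht s
      · have : (s.filter (fun x => !tB P x)).contains x = true := by
          simp [List.contains_eq_mem, List.mem_filter, hs, hb]
        rw [this, if_pos rfl, hadd]
        exact ih ht s
    · have hc : (s.filter (fun x => !tB P x)).contains x = false := by
        simp only [List.contains_eq_mem, List.mem_filter]
        simp [hs]
      have hadd : PySem.Set.add s x = s ++ [x] := by
        simp [PySem.Set.add, List.contains_eq_mem, hs]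
      rw [hc, if_neg (by simp), hadd]
      by_cases hb : tB P x = true
      · rw [if_pos hb]
        have : (s ++ [x]).filter (fun x => !tB P x) = s.filter (fun x => !tB P x) := by
          simp [List.filter_append, hb]
        rw [← this] at *
        exact ih ht (s ++ [x])
      · rw [if_neg hb]
        have : (s ++ [x]).filter (fun x => !tB P x)
            = s.filter (fun x => !tB P x) ++ [x] := by
          simp [List.filter_append, hb]
        rw [← this]
        exact ih ht (s ++ [x])

-- ===== VERDICT (by name: the statements are the Claim_ definitions above) =====
theorem binaryToCover_spec : Claim_unchanged_binaryToCover := by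
  intro P _ hD
  show PySem.List.sorted2
      (P.foldl (fun acc uv =>
        if acc.contains uv then acc
        else if tA P uv then acc else acc ++ [uv]) []) (·.1) (·.2)
    = PySem.List.sorted2 ((PySem.Set.ofList P).filter (fun x => !tB P x)) (·.1) (·.2)
  have h0 := loop_eq P P (tA_eq_tB P hD) []
  simp only [List.filter_nil] at h0
  rw [h0, PySem.Set.ofList_eq_foldl]

theorem binaryToCover_changed : Claim_changed_binaryToCover := by
  unfold Claim_changed_binaryToCover; decide

theorem binaryToCover_tight : Claim_exact_binaryToCover := by
  intro P _ hD heq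
  unfold D_binaryToCover pvTrans at hD
  obtain ⟨uv, huv, ⟨uw, hm, heqw, hu, hv, hwv⟩, hall⟩ := hD
  have htB : tB P uv = true := (tB_iff P uv).2 ⟨uw, hm, heqw, hu, hv, hwv⟩
  have htA : tA P uv = false := by
    rw [Bool.eq_false_iff, Ne, tA_iff]
    rintro ⟨uw', hm', heq', h1', hu', hv', hwv'⟩
    have := hall uw' hm' ⟨heq', hu', hv', hwv'⟩
    omega
  have hA : uv ∈ binaryToCover P := by
    show uv ∈ PySem.List.sorted2
      (P.foldl (fun acc uv =>
        if acc.contains uv then acc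
        else if tA P uv then acc else acc ++ [uv]) []) (·.1) (·.2)
    exact (PySem.List.sorted2_perm _ _ _ _).mem_iff.2
      (mem_loopA P P [] uv (Or.inr ⟨huv, htA⟩))
  have hB : uv ∉ binaryToCover_alt P := by
    show uv ∉ PySem.List.sorted2
      ((PySem.Set.ofList P).filter (fun x => !tB P x)) (·.1) (·.2)
    rw [(PySem.List.sorted2_perm _ _ _ _).mem_iff]
    simp [List.mem_filter, htB]
  rw [heq] at hA
  exact hB hA
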